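-- pv_equiv track=rewrite | github.com/eliasvangage/ufc-scraping | backend/scraper/odds_scraper.py | merge_odds
-- ===== SOURCE A (Python) =====
-- def merge_odds(existing: dict, fresh: dict):
--     added, updated, unchanged = 0, 0, 0
--     merged = dict(existing)
--
--     for key, new_val in fresh.items():
--         if key not in merged:
--             merged[key] = new_val
--             added += 1
--         else:
--             # Compare values; update if different
--             if merged[key] != new_val:
--                 merged[key] = new_val
--                 updated += 1
--             else:
--                 unchanged += 1
--     return merged, added, updated, unchanged
-- ===== SOURCE B (Python) =====
-- def merge_odds(existing: dict, fresh: dict):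
--     merged = {**existing, **fresh}
--     added = len(fresh.keys() - existing.keys())
--     common = fresh.keys() & existing.keys()
--     updated = sum(1 for k in common if existing[k] != fresh[k])
--     unchanged = len(common) - updated
--     return merged, added, updated, unchanged
-- ===== Notes on version B (the rewrite author's own statement) =====
-- stated objective: idiomatic
-- what changed: Replaces A's single loop with per-key branching and three mutable counters by a one-shot dict merge {**existing, **fresh} plus set algebra on the key views (set difference for added, intersection for common, a comprehension count for updated, and unchanged by subtraction).
import Mathlib
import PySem

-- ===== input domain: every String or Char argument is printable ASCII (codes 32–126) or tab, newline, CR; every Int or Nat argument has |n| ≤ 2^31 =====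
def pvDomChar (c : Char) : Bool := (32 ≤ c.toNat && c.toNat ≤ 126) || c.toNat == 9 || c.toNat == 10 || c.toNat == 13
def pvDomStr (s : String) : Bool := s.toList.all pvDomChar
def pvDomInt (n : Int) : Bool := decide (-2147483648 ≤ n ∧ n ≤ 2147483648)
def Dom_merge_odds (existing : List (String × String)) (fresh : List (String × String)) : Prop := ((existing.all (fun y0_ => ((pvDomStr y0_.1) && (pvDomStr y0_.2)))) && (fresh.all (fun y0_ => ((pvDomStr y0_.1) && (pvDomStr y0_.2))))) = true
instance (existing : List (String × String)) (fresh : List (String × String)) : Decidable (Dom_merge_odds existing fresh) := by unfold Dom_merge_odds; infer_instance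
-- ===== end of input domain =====

-- B merges with one dict-splat and derives the counts by set algebra on the key views (idiomatic; same cost).

-- ===== PORT A =====
-- A's loop body: if key not in merged → add; elif value differs → update; else unchanged.
-- merged[key] != new_val is ported as merged.get? key != some new_val (the key is present in that branch).
def mergeStepA (s : PySem.Dict String String × Int × Int × Int) (p : String × String) :
    PySem.Dict String String × Int × Int × Int :=
  if s.1.contains p.1 = false then (s.1.insert p.1 p.2, s.2.1 + 1, s.2.2.1, s.2.2.2)
  else if s.1.get? p.1 != some p.2 then (s.1.insert p.1 p.2, s.2.1, s.2.2.1 + 1, s.2.2.2)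
  else (s.1, s.2.1, s.2.2.1, s.2.2.2 + 1)

def merge_odds (existing : List (String × String)) (fresh : List (String × String)) : (List (String × String)) × Int × Int × Int :=
  let st := (PySem.Dict.ofList fresh).items.foldl mergeStepA (PySem.Dict.ofList existing, 0, 0, 0)
  (st.1.items, st.2.1, st.2.2.1, st.2.2.2)

-- ===== PORT B =====
-- existing[k] != fresh[k] (both keys present in `common`) is ported as e.get? k != f.get? k.
def merge_odds_alt (existing : List (String × String)) (fresh : List (String × String)) : (List (String × String)) × Int × Int × Int :=
  let e := PySem.Dict.ofList existing
  let f := PySem.Dict.ofList fresh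
  let merged := f.items.foldl (fun d p => d.insert p.1 p.2) e
  let added : Int := ((f.keys.filter (fun k => !(e.contains k))).length : Int)
  let common := f.keys.filter (fun k => e.contains k)
  let updated : Int := ((common.filter (fun k => e.get? k != f.get? k)).length : Int)
  (merged.items, added, updated, (common.length : Int) - updated)

-- ===== PRECONDITION & SPEC =====
def Spec_merge_odds (existing : List (String × String)) (fresh : List (String × String)) (out : (List (String × String)) × Int × Int × Int) : Prop := out = merge_odds_alt existing fresh
instance (existing : List (String × String)) (fresh : List (String × String)) (out : (List (String × String)) × Int × Int × Int) : Decidable (Spec_merge_odds existing fresh out) := by unfold Spec_merge_odds; infer_instance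

-- ===== CLAIM (what is proved, stated in full; the proofs are below) =====
def Claim_equal_merge_odds : Prop := ∀ (existing : List (String × String)) (fresh : List (String × String)), Dom_merge_odds existing fresh → Spec_merge_odds existing fresh (merge_odds existing fresh)

-- ===== LEMMAS AND PROOFS =====

-- inserting the value already stored at a key is a no-op (keys unique)
theorem insert_eq_self_of_get (d : PySem.Dict String String) (k v : String)
    (hnd : d.keys.Nodup) (h : d.get? k = some v) : d.insert k v = d := by
  apply PySem.Dict.ext
  have hc : d.contains k = true := by
    rw [PySem.Dict.contains_eq_isSome_get?, h]; rfl
  rw [PySem.Dict.items_insert_of_contains d v hc]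
  conv_rhs => rw [← List.map_id d.items]
  apply List.map_congr_left
  rintro ⟨p1, p2⟩ hp
  by_cases hk : p1 = k
  · have hget : d.get? p1 = some p2 := PySem.Dict.get?_of_mem_items d hp hnd
    rw [hk, h] at hget
    simp [hk, Option.some.inj hget]
  · simp [hk]

-- filter over keys = filter over items when the predicate looks only at the key
theorem length_filter_keys (q : String → Bool) (l : List (String × String)) :
    ((l.map Prod.fst).filter q).length = (l.filter (fun p => q p.1)).length := by
  induction l with
  | nil => rfl
  | cons h t ih => by_cases hq : q h.1 <;> simp [List.filter, hq, ih]

-- split a filter by a second predicate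
theorem length_filter_split {α : Type} (C N : α → Bool) (l : List α) :
    (l.filter C).length
      = (l.filter (fun x => C x && N x)).length + (l.filter (fun x => C x && !N x)).length := by
  induction l with
  | nil => rfl
  | cons h t ih =>
    by_cases hc : C h <;> by_cases hn : N h <;> simp [List.filter, hc, hn, ih] <;> omega

-- the loop invariant: A's fold over fresh items, while d agrees with e on all still-unprocessed keys
theorem loopA_eq (e : PySem.Dict String String) :
    ∀ (l : List (String × String)) (d : PySem.Dict String String) (a u c : Int),
      d.keys.Nodup → (l.map Prod.fst).Nodup →
      (∀ p ∈ l, d.get? p.1 = e.get? p.1) →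
      l.foldl mergeStepA (d, a, u, c) =
        (l.foldl (fun d p => d.insert p.1 p.2) d,
         a + ((l.filter (fun p => !(e.contains p.1))).length : Int),
         u + ((l.filter (fun p => e.contains p.1 && (e.get? p.1 != some p.2))).length : Int),
         c + ((l.filter (fun p => e.get? p.1 == some p.2)).length : Int)) := by
  intro l
  induction l with
  | nil => intro d a u c _ _ _; simp
  | cons hd t ih =>
    rintro d a u c hnd hlnd hagree
    obtain ⟨k, v⟩ := hd
    have hag : d.get? k = e.get? k := hagree (k, v) (List.mem_cons_self)
    have hcon : d.contains k = e.contains k := by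
      rw [PySem.Dict.contains_eq_isSome_get?, PySem.Dict.contains_eq_isSome_get?, hag]
    have htnd : (t.map Prod.fst).Nodup := (List.nodup_cons.mp hlnd).2
    have hknot : ∀ p ∈ t, p.1 ≠ k := by
      intro p hp hpk
      exact (List.nodup_cons.mp hlnd).1 (hpk ▸ (List.mem_map_of_mem hp : p.1 ∈ t.map Prod.fst))
    have hagree' : ∀ w : String, ∀ p ∈ t, (d.insert k w).get? p.1 = e.get? p.1 := by
      intro w p hp
      rw [PySem.Dict.get?_insert, if_neg (hknot p hp)]
      exact hagree p (List.mem_cons_of_mem _ hp)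
    by_cases hc : d.contains k = false
    · -- key not in merged: added
      have hec : e.contains k = false := hcon ▸ hc
      have hen : e.get? k = none := by
        have := PySem.Dict.contains_eq_isSome_get? e k
        rw [hec] at this
        exact Option.not_isSome_iff_eq_none.mp (by simp [← this])
      rw [List.foldl_cons, List.foldl_cons]
      show List.foldl mergeStepA (mergeStepA (d, a, u, c) (k, v)) t = _
      rw [show mergeStepA (d, a, u, c) (k, v) = (d.insert k v, a + 1, u, c) by
        simp [mergeStepA, hc]]
      rw [ih (d.insert k v) (a + 1) u c (PySem.Dict.nodup_keys_insert d k v hnd) htnd (hagree' v)]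
      simp only [List.filter_cons, hec, hen, Prod.mk.injEq]
      refine ⟨trivial, ?_, ?_, ?_⟩ <;> simp [add_assoc, add_comm]
    · -- key present
      have hct : d.contains k = true := by revert hc; cases d.contains k <;> simp
      have hect : e.contains k = true := hcon ▸ hct
      by_cases hne : (d.get? k != some v) = true
      · -- values differ: updated
        have hene : (e.get? k != some v) = true := hag ▸ hne
        have heq2 : (e.get? k == some v) = false := by
          revert hene; cases h : (e.get? k == some v) <;> simp [bne, h]
        rw [List.foldl_cons, List.foldl_cons]
        show List.foldl mergeStepA (mergeStepA (d, a, u, c) (k, v)) t = _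
        rw [show mergeStepA (d, a, u, c) (k, v) = (d.insert k v, a, u + 1, c) by
          simp only [mergeStepA]; rw [if_neg (by simp [hct]), if_pos hne]]
        rw [ih (d.insert k v) a (u + 1) c (PySem.Dict.nodup_keys_insert d k v hnd) htnd (hagree' v)]
        simp only [List.filter_cons, hect, hene, heq2, Bool.not_true, Bool.true_and, Prod.mk.injEq]
        refine ⟨trivial, ?_, ?_, ?_⟩ <;> simp [add_assoc, add_comm]
      · -- values equal: unchanged
        have hdv : d.get? k = some v := by
          have hb : (d.get? k == some v) = true := by
            revert hne; cases h : (d.get? k == some v) <;> simp [bne, h]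
          exact eq_of_beq hb
        have hev : e.get? k = some v := hag ▸ hdv
        have hene : (e.get? k != some v) = false := by simp [hev]
        rw [List.foldl_cons, List.foldl_cons]
        show List.foldl mergeStepA (mergeStepA (d, a, u, c) (k, v)) t = _
        rw [show mergeStepA (d, a, u, c) (k, v) = (d, a, u, c + 1) by
          simp only [mergeStepA]; rw [if_neg (by simp [hct]), if_neg (by simp [hne])]]
        rw [insert_eq_self_of_get d k v hnd hdv]
        rw [ih d a u (c + 1) hnd htnd (fun p hp => hagree p (List.mem_cons_of_mem _ hp))]
        simp only [List.filter_cons, hect, hev, Prod.mk.injEq]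
        refine ⟨trivial, ?_, ?_, ?_⟩ <;> simp [add_assoc, add_comm]

-- ===== VERDICT (by name: the statement is the Claim_ definition above) =====
-- !(x != y) = (x == y), and '== some v' forces the key present
theorem unch_pred_eq (e : PySem.Dict String String) (p : String × String) :
    (e.contains p.1 && !(e.get? p.1 != some p.2)) = (e.get? p.1 == some p.2) := by
  rw [PySem.Dict.contains_eq_isSome_get?]
  cases h : e.get? p.1
  · simp
  · simp [bne]

theorem merge_odds_spec : Claim_equal_merge_odds := by
  intro existing fresh _
  unfold Spec_merge_odds merge_odds merge_odds_alt
  have hen : (PySem.Dict.ofList existing).keys.Nodup := PySem.Dict.nodup_keys_ofList existing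
  have hfn : (PySem.Dict.ofList fresh).keys.Nodup := PySem.Dict.nodup_keys_ofList fresh
  have hmain := loopA_eq (PySem.Dict.ofList existing) (PySem.Dict.ofList fresh).items
      (PySem.Dict.ofList existing) 0 0 0 hen hfn (fun p _ => rfl)
  rw [hmain]
  set e := PySem.Dict.ofList existing with he
  set f := PySem.Dict.ofList fresh with hf
  simp only [Prod.mk.injEq]
  have hkeys : f.keys = f.items.map Prod.fst := rfl
  have hupd : f.items.filter (fun p => (e.get? p.1 != f.get? p.1) && e.contains p.1)
      = f.items.filter (fun p => e.contains p.1 && (e.get? p.1 != some p.2)) :=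
    List.filter_congr (fun p hp => by
      have hv : f.get? p.1 = some p.2 :=
        PySem.Dict.get?_of_mem_items f (by simpa using hp) hfn
      rw [hv, Bool.and_comm])
  refine ⟨trivial, ?_, ?_, ?_⟩
  · -- added
    rw [hkeys, length_filter_keys (fun k => !(e.contains k)) f.items]
    omega
  · -- updated
    rw [List.filter_filter, hkeys, length_filter_keys _ f.items, hupd]
    omega
  · -- unchanged
    have hsplit := length_filter_split (fun p : String × String => e.contains p.1)
      (fun p : String × String => e.get? p.1 != some p.2) f.items
    have hunch : (f.items.filter (fun p => e.contains p.1 && !(e.get? p.1 != some p.2)))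
        = f.items.filter (fun p => e.get? p.1 == some p.2) :=
      List.filter_congr (fun p _ => unch_pred_eq e p)
    rw [hunch] at hsplit
    rw [List.filter_filter, hkeys, length_filter_keys _ f.items, length_filter_keys _ f.items, hupd]
    omega
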